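-- pv_equiv track=rewrite | github.com/miliar/Code_Jam_Webscraper | solutions_python/solutions_year14_round4_nr1/109.py | solve
-- ===== SOURCE A (Python) =====
-- import math
--
-- def solve(f,C):
--     used = [False for i in range(len(f))]
--     ans = 0
--     for i in range(len(f)):
--         if used[i]:
--             tmp = 0
--             for j in range(i+1,len(f)):
--                 if not used[j]: tmp += 1
--             return str(ans + math.ceil(tmp/2))
--
--         for j in range(i+1,len(f)):
--             if used[j]: continue
--             if f[i] + f[j] <= C:
--                 used[j] = True
--                 break
--         used[i] = True
--         ans += 1
--
--
--     return str(ans)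
-- ===== SOURCE B (Python) =====
-- import math
--
-- # B: segment tree over indices (cached min value + alive count), queried for the
-- # leftmost alive index below a threshold; O(n log n) instead of A's nested scans.
--
-- def _mn(a, b):
--     if a is None:
--         return b
--     if b is None:
--         return a
--     return a if a <= b else b
--
-- def _build(f, lo, hi):
--     # node = (min over alive values, alive count, left, right); leaf children are None
--     if hi - lo == 1:
--         return (f[lo], 1, None, None)
--     mid = (lo + hi) // 2
--     l = _build(f, lo, mid)
--     r = _build(f, mid, hi)
--     return (_mn(l[0], r[0]), l[1] + r[1], l, r)
--
-- def _delete(t, lo, hi, i):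
--     if hi - lo == 1:
--         return (None, 0, None, None)
--     mid = (lo + hi) // 2
--     l, r = t[2], t[3]
--     if i < mid:
--         l = _delete(l, lo, mid, i)
--     else:
--         r = _delete(r, mid, hi, i)
--     return (_mn(l[0], r[0]), l[1] + r[1], l, r)
--
-- def _alive(t, lo, hi, i):
--     while hi - lo > 1:
--         mid = (lo + hi) // 2
--         if i < mid:
--             t, hi = t[2], mid
--         else:
--             t, lo = t[3], mid
--     return t[1] == 1
--
-- def _count_from(t, lo, hi, ql):
--     # number of alive indices in [max(ql, lo), hi)
--     if ql <= lo:
--         return t[1]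
--     if ql >= hi:
--         return 0
--     mid = (lo + hi) // 2
--     return _count_from(t[2], lo, mid, ql) + _count_from(t[3], mid, hi, ql)
--
-- def _find_from(t, lo, hi, ql, thr):
--     # leftmost alive index in [max(ql, lo), hi) with value <= thr, else None
--     if ql >= hi or t[0] is None or t[0] > thr:
--         return None
--     if hi - lo == 1:
--         return lo
--     mid = (lo + hi) // 2
--     res = _find_from(t[2], lo, mid, ql, thr)
--     if res is not None:
--         return res
--     return _find_from(t[3], mid, hi, ql, thr)
--
-- def solve(f, C):
--     n = len(f)
--     if n == 0:
--         return "0"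
--     root = _build(f, 0, n)
--     for i in range(n):
--         if not _alive(root, 0, n, i):
--             tmp = _count_from(root, 0, n, i + 1)
--             return str(i + math.ceil(tmp / 2))
--         root = _delete(root, 0, n, i)
--         j = _find_from(root, 0, n, i + 1, C - f[i])
--         if j is not None:
--             root = _delete(root, 0, n, j)
--     return str(n)
-- ===== Notes on version B (the rewrite author's own statement) =====
-- stated objective: faster
-- what changed: B replaces A's boolean flag array and nested linear scans by a recursive segment tree over indices caching (min alive value, alive count): the partner search becomes a leftmost-alive-index-below-threshold tree descent with deletions, and A's remainder-counting loop becomes a range alive-count query.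
import Mathlib
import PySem

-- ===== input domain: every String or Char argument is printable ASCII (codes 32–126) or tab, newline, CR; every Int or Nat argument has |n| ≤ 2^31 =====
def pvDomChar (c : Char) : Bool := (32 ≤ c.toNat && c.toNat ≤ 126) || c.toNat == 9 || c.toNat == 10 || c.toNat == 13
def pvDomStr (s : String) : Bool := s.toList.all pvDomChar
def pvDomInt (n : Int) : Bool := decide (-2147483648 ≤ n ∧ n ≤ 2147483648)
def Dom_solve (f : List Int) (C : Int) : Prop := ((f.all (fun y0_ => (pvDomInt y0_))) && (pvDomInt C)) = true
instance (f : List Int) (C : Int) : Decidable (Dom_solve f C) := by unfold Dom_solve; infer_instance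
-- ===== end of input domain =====

-- B replaces A's boolean flag array and nested linear scans by a segment tree over
-- indices (cached min alive value + alive count) with deletions; same return value.

-- small named termination lemmas (cited by the ports' decreasing_by; keeps the defs small)
theorem pvDecSub (n j : Nat) (h : j < n) : n - (j + 1) < n - j :=
  Nat.sub_succ_lt_self n j h
theorem pvDecBuildL (lo hi : Nat) (h : ¬ hi ≤ lo + 1) : (lo + hi) / 2 - lo < hi - lo :=
  Nat.sub_lt_sub_right
    ((Nat.le_div_iff_mul_le (by decide)).mpr (by
      have h2 : lo + 2 ≤ hi := Nat.lt_of_not_le h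
      rw [Nat.mul_two]
      exact Nat.add_le_add_left (Nat.le_of_lt (Nat.lt_of_lt_of_le (Nat.lt_add_of_pos_right (by decide)) h2)) lo))
    ((Nat.div_lt_iff_lt_mul (by decide)).mpr (by
      have : lo + 2 ≤ hi := Nat.lt_of_not_le h
      calc lo + hi < hi + hi := Nat.add_lt_add_right (Nat.lt_of_lt_of_le (Nat.lt_add_of_pos_right (by decide)) this) hi
        _ = hi * 2 := (Nat.mul_two hi).symm))
theorem pvDecBuildR (lo hi : Nat) (h : ¬ hi ≤ lo + 1) : hi - (lo + hi) / 2 < hi - lo :=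
  Nat.sub_lt_sub_left
    (by
      have h2 : lo + 2 ≤ hi := Nat.lt_of_not_le h
      exact Nat.lt_of_lt_of_le (Nat.lt_add_of_pos_right (k := 2) (by decide)) h2)
    ((Nat.le_div_iff_mul_le (by decide)).mpr (by
      have h2 : lo + 2 ≤ hi := Nat.lt_of_not_le h
      calc (lo + 1) * 2 = lo + (lo + 2) := by ring
        _ ≤ lo + hi := Nat.add_le_add_left h2 lo))

-- ===== PORT A =====
-- inner 'for j in range(j0, len(f))' loop of A: skip used j, mark the first
-- unused j with f[i]+f[j] <= C as used and stop (break); indices stay in range,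
-- so List.getD is exact for Python's f[j].
def pairStep (f : List Int) (C : Int) (fi : Int) (used : List Bool) (j n : Nat) : List Bool :=
  if h : j < n then
    if used.getD j false then pairStep f C fi used (j+1) n
    else if fi + f.getD j 0 ≤ C then used.set j true
    else pairStep f C fi used (j+1) n
  else used
termination_by n - j
decreasing_by all_goals exact pvDecSub n j h

-- A's 'tmp' counting loop (accumulator tmp)
def countUnused (used : List Bool) (j n : Nat) (tmp : Int) : Int :=
  if h : j < n then
    countUnused used (j+1) n (if used.getD j false then tmp else tmp + 1)
  else tmp
termination_by n - j
decreasing_by exact pvDecSub n j h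

-- A's outer 'for i in range(len(f))' loop with state (used, ans) and early return.
-- math.ceil(tmp/2) is ported as (tmp+1)/2, exact for the nonnegative tmp this loop produces.
def solveLoopA (f : List Int) (C : Int) (n i : Nat) (used : List Bool) (ans : Int) : String :=
  if h : i < n then
    if used.getD i false then
      PySem.Int.toStr (ans + (countUnused used (i+1) n 0 + 1) / 2)
    else
      solveLoopA f C n (i+1) ((pairStep f C (f.getD i 0) used (i+1) n).set i true) (ans + 1)
  else PySem.Int.toStr ans
termination_by n - i
decreasing_by exact pvDecSub n i h

def solve (f : List Int) (C : Int) : String :=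
  solveLoopA f C f.length 0 (List.replicate f.length false) 0

-- ===== PORT B =====
-- Source B's tree node tuple (minval, count, left, right): leaves carry (value-or-None, count),
-- inner nodes cache the min alive value and the alive count of their two children.
inductive STree where
  | leaf : Option Int → Nat → STree
  | node : Option Int → Nat → STree → STree → STree

-- Source B's _mn: min of two optional values (None = absent)
def omin : Option Int → Option Int → Option Int
  | none, b => b
  | some a, none => some a
  | some a, some b => if a ≤ b then some a else some b

def tmin : STree → Option Int
  | .leaf v _ => v
  | .node m _ _ _ => m

def tcount : STree → Nat
  | .leaf _ c => c
  | .node _ c _ _ => c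

-- Source B's _build over [lo,hi); only called with lo < hi, the 'hi - lo == 1' test
-- is written 'hi ≤ lo + 1' (equal on those inputs) so Lean sees termination.
def build (f : List Int) (lo hi : Nat) : STree :=
  if h : hi ≤ lo + 1 then .leaf (some (f.getD lo 0)) 1
  else
    let mid := (lo + hi) / 2
    let l := build f lo mid
    let r := build f mid hi
    .node (omin (tmin l) (tmin r)) (tcount l + tcount r) l r
termination_by hi - lo
decreasing_by
  · exact pvDecBuildL lo hi h
  · exact pvDecBuildR lo hi h

-- Source B's _delete: Source B tests 'hi - lo == 1', which on its well-formed trees is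
-- exactly the leaf case, so the port matches on the node shape.
def sdelete : STree → Nat → Nat → Nat → STree
  | .leaf _ _, _, _, _ => .leaf none 0
  | .node _ _ l r, lo, hi, i =>
      let mid := (lo + hi) / 2
      if i < mid then
        let l' := sdelete l lo mid i
        .node (omin (tmin l') (tmin r)) (tcount l' + tcount r) l' r
      else
        let r' := sdelete r mid hi i
        .node (omin (tmin l) (tmin r')) (tcount l + tcount r') l r'

-- Source B's _alive while-loop descent, as the equivalent structural recursion
def aliveQ : STree → Nat → Nat → Nat → Bool
  | .leaf _ c, _, _, _ => c == 1
  | .node _ _ l r, lo, hi, i =>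
      let mid := (lo + hi) / 2
      if i < mid then aliveQ l lo mid i else aliveQ r mid hi i

-- Source B's _count_from; on a leaf the two guards collapse to 'ql ≤ lo' (hi = lo+1)
def countFrom : STree → Nat → Nat → Nat → Nat
  | .leaf _ c, lo, _, ql => if ql ≤ lo then c else 0
  | .node _ c l r, lo, hi, ql =>
      if ql ≤ lo then c
      else if hi ≤ ql then 0
      else countFrom l lo ((lo + hi) / 2) ql + countFrom r ((lo + hi) / 2) hi ql

-- Source B's _find_from: prune on empty/over-threshold min, else leftmost in the left child first
def findFrom : STree → Nat → Nat → Nat → Int → Option Nat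
  | .leaf v _, lo, hi, ql, thr =>
      if hi ≤ ql then none
      else match v with
        | none => none
        | some x => if thr < x then none else some lo
  | .node m _ l r, lo, hi, ql, thr =>
      if hi ≤ ql then none
      else match m with
        | none => none
        | some x =>
            if thr < x then none
            else match findFrom l lo ((lo + hi) / 2) ql thr with
              | some j => some j
              | none => findFrom r ((lo + hi) / 2) hi ql thr

-- Source B's 'for i in range(n)' loop; math.ceil(tmp/2) ported as (tmp+1)/2 (tmp ≥ 0)
def solveLoopBseg (f : List Int) (C : Int) (n i : Nat) (root : STree) : String :=
  if _h : i < n then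
    if !aliveQ root 0 n i then
      PySem.Int.toStr ((i : Int) + ((countFrom root 0 n (i + 1) : Int) + 1) / 2)
    else
      let root1 := sdelete root 0 n i
      match findFrom root1 0 n (i + 1) (C - f.getD i 0) with
      | some j => solveLoopBseg f C n (i + 1) (sdelete root1 0 n j)
      | none => solveLoopBseg f C n (i + 1) root1
  else PySem.Int.toStr (n : Int)
termination_by n - i
decreasing_by all_goals exact pvDecSub n i _h

def solve_alt (f : List Int) (C : Int) : String :=
  if f.length = 0 then "0"
  else solveLoopBseg f C f.length 0 (build f 0 f.length)

-- ===== PRECONDITION & SPEC =====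
def Spec_solve (f : List Int) (C : Int) (out : String) : Prop := out = solve_alt f C
instance (f : List Int) (C : Int) (out : String) : Decidable (Spec_solve f C out) := by unfold Spec_solve; infer_instance

-- ===== CLAIM (what is proved, stated in full; the proofs are below) =====
def Claim_equal_solve : Prop := ∀ (f : List Int) (C : Int), Dom_solve f C → Spec_solve f C (solve f C)

-- ===== LEMMAS AND PROOFS =====

theorem getD_set_ne (l : List Bool) (i k : Nat) (b : Bool) (h : k ≠ i) :
    (l.set i b).getD k false = l.getD k false := by
  simp [List.getD_eq_getElem?_getD, List.getElem?_set_ne h.symm]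

theorem getD_set_self (l : List Bool) (i : Nat) (h : i < l.length) :
    (l.set i true).getD i false = true := by
  simp [List.getD_eq_getElem?_getD, h]

-- alive-value function represented by a tree
def gOf (f : List Int) (u : List Bool) : Nat → Option Int :=
  fun k => if u.getD k false then none else some (f.getD k 0)

def vals (g : Nat → Option Int) (lo hi : Nat) : List Int :=
  (List.range' lo (hi - lo)).filterMap g

def specMin (L : List Int) : Option Int :=
  L.foldr (fun v m => omin (some v) m) none

def models (g : Nat → Option Int) : STree → Nat → Nat → Prop
  | .leaf v c, lo, hi =>
      hi = lo + 1 ∧ v = g lo ∧ c = (if (g lo).isSome then 1 else 0)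
  | .node m c l r, lo, hi =>
      lo + 1 < hi ∧ m = omin (tmin l) (tmin r) ∧ c = tcount l + tcount r ∧
      models g l lo ((lo + hi) / 2) ∧ models g r ((lo + hi) / 2) hi

theorem omin_none_right (a : Option Int) : omin a none = a := by
  cases a <;> rfl

theorem omin_assoc (a b c : Option Int) : omin (omin a b) c = omin a (omin b c) := by
  cases a <;> cases b <;> cases c <;> simp only [omin] <;>
    split_ifs <;> first | rfl | (simp only [omin] ; split_ifs <;> first | rfl | omega) | omega

theorem specMin_cons (x : Int) (xs : List Int) :
    specMin (x :: xs) = omin (some x) (specMin xs) := rfl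

theorem range'_split (a b c : Nat) (h1 : a ≤ b) (h2 : b ≤ c) :
    List.range' a (c - a) = List.range' a (b - a) ++ List.range' b (c - b) := by
  have h := List.range'_append (s := a) (m := b - a) (n := c - b) (step := 1)
  rw [show a + 1 * (b - a) = b by omega, show (b - a) + (c - b) = c - a by omega] at h
  exact h.symm

theorem specMin_append (xs ys : List Int) :
    specMin (xs ++ ys) = omin (specMin xs) (specMin ys) := by
  induction xs with
  | nil => rfl
  | cons x xs ih => simp only [List.cons_append, specMin, List.foldr_cons] at *; rw [ih, omin_assoc]

theorem specMin_eq_none (L : List Int) (h : specMin L = none) : L = [] := by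
  cases L with
  | nil => rfl
  | cons x xs =>
      exfalso
      rw [specMin_cons] at h
      cases hx : specMin xs with
      | none => rw [hx, omin_none_right] at h; simp at h
      | some z =>
          rw [hx] at h
          simp only [omin] at h
          split at h <;> simp at h

theorem specMin_le (L : List Int) :
    ∀ (x v : Int), specMin L = some x → v ∈ L → x ≤ v := by
  induction L with
  | nil => intro x v h hv; simp at hv
  | cons y ys ih =>
      intro x v h hv
      rw [specMin_cons] at h
      cases hy : specMin ys with
      | none =>
          rw [hy, omin_none_right, Option.some.injEq] at h
          subst h
          have hnil := specMin_eq_none ys hy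
          subst hnil
          simp at hv
          omega
      | some z =>
          rw [hy] at h
          simp only [omin, Option.some.injEq] at h
          rcases List.mem_cons.mp hv with rfl | hv'
          · split at h <;> simp only [Option.some.injEq] at h <;> omega
          · have hz := ih z v hy hv'
            split at h <;> simp only [Option.some.injEq] at h <;> omega

theorem vals_nil_of_ge (g : Nat → Option Int) (a hi : Nat) (h : hi ≤ a) : vals g a hi = [] := by
  unfold vals
  have : hi - a = 0 := by omega
  simp [this]

theorem vals_append (g : Nat → Option Int) (a b c : Nat) (h1 : a ≤ b) (h2 : b ≤ c) :
    vals g a c = vals g a b ++ vals g b c := by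
  unfold vals
  rw [range'_split a b c h1 h2, List.filterMap_append]

theorem mem_vals (g : Nat → Option Int) (lo hi k : Nat) (v : Int)
    (hk1 : lo ≤ k) (hk2 : k < hi) (hg : g k = some v) : v ∈ vals g lo hi := by
  unfold vals
  exact List.mem_filterMap.mpr ⟨k, List.mem_range'_1.mpr ⟨hk1, by omega⟩, hg⟩

theorem tmin_models (g : Nat → Option Int) (t : STree) :
    ∀ lo hi, models g t lo hi → tmin t = specMin (vals g lo hi) := by
  induction t with
  | leaf v c =>
      intro lo hi h
      obtain ⟨h1, h2, _⟩ := h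
      subst h1
      unfold vals
      simp only [Nat.add_sub_cancel_left, List.range'_one, List.filterMap_cons, List.filterMap_nil]
      cases hg : g lo <;> simp [tmin, h2, hg, specMin, omin_none_right]
  | node m c l r ihl ihr =>
      intro lo hi h
      obtain ⟨h1, h2, _, hl, hr⟩ := h
      have hmid1 : lo ≤ (lo + hi) / 2 := by omega
      have hmid2 : (lo + hi) / 2 ≤ hi := by omega
      rw [show tmin (.node m c l r) = m from rfl, h2,
          ihl lo ((lo + hi) / 2) hl, ihr ((lo + hi) / 2) hi hr,
          vals_append g lo ((lo + hi) / 2) hi hmid1 hmid2, specMin_append]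

theorem tcount_models (g : Nat → Option Int) (t : STree) :
    ∀ lo hi, models g t lo hi → tcount t = (vals g lo hi).length := by
  induction t with
  | leaf v c =>
      intro lo hi h
      obtain ⟨h1, _, h3⟩ := h
      subst h1
      unfold vals
      simp only [Nat.add_sub_cancel_left, List.range'_one, List.filterMap_cons, List.filterMap_nil]
      cases hg : g lo <;> simp [tcount, h3, hg]
  | node m c l r ihl ihr =>
      intro lo hi h
      obtain ⟨h1, _, h3, hl, hr⟩ := h
      rw [show tcount (.node m c l r) = c from rfl, h3,
          ihl lo ((lo + hi) / 2) hl, ihr ((lo + hi) / 2) hi hr,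
          vals_append g lo ((lo + hi) / 2) hi (by omega) (by omega), List.length_append]

theorem models_congr (g g' : Nat → Option Int) (t : STree) :
    ∀ lo hi, (∀ k, lo ≤ k → k < hi → g k = g' k) → models g t lo hi → models g' t lo hi := by
  induction t with
  | leaf v c =>
      intro lo hi hgg h
      obtain ⟨h1, h2, h3⟩ := h
      have : g lo = g' lo := hgg lo (le_refl _) (by omega)
      exact ⟨h1, by rw [h2, this], by rw [h3, this]⟩
  | node m c l r ihl ihr =>
      intro lo hi hgg h
      obtain ⟨h1, h2, h3, hl, hr⟩ := h
      exact ⟨h1, h2, h3,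
        ihl lo ((lo + hi) / 2) (fun k hk1 hk2 => hgg k hk1 (by omega)) hl,
        ihr ((lo + hi) / 2) hi (fun k hk1 hk2 => hgg k (by omega) hk2) hr⟩

theorem build_models (f : List Int) :
    ∀ m lo hi, hi - lo ≤ m → lo < hi →
      models (fun k => some (f.getD k 0)) (build f lo hi) lo hi := by
  intro m
  induction m with
  | zero => intro lo hi hm h; omega
  | succ m ih =>
      intro lo hi hm h
      rw [build]
      by_cases h1 : hi ≤ lo + 1
      · rw [dif_pos h1]
        exact ⟨by omega, rfl, rfl⟩
      · rw [dif_neg h1]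
        refine ⟨by omega, rfl, rfl, ?_, ?_⟩
        · exact ih lo ((lo + hi) / 2) (by omega) (by omega)
        · exact ih ((lo + hi) / 2) hi (by omega) (by omega)

theorem sdelete_models (g : Nat → Option Int) (t : STree) :
    ∀ lo hi i, lo ≤ i → i < hi → models g t lo hi →
      models (fun k => if k = i then none else g k) (sdelete t lo hi i) lo hi := by
  induction t with
  | leaf v c =>
      intro lo hi i h1 h2 h
      obtain ⟨hh, _, _⟩ := h
      have : i = lo := by omega
      subst this
      exact ⟨hh, by simp, by simp⟩
  | node m c l r ihl ihr =>
      intro lo hi i h1 h2 h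
      obtain ⟨hh, _, _, hl, hr⟩ := h
      rw [sdelete]
      by_cases hi' : i < (lo + hi) / 2
      · simp only [if_pos hi']
        refine ⟨hh, rfl, rfl, ihl lo ((lo + hi) / 2) i h1 hi' hl, ?_⟩
        exact models_congr g _ r ((lo + hi) / 2) hi
          (fun k hk1 hk2 => by simp [show k ≠ i by omega]) hr
      · simp only [if_neg hi']
        refine ⟨hh, rfl, rfl, ?_, ihr ((lo + hi) / 2) hi i (by omega) h2 hr⟩
        exact models_congr g _ l lo ((lo + hi) / 2)
          (fun k hk1 hk2 => by simp [show k ≠ i by omega]) hl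

theorem aliveQ_models (g : Nat → Option Int) (t : STree) :
    ∀ lo hi i, lo ≤ i → i < hi → models g t lo hi →
      aliveQ t lo hi i = (g i).isSome := by
  induction t with
  | leaf v c =>
      intro lo hi i h1 h2 h
      obtain ⟨hh, _, h3⟩ := h
      have : i = lo := by omega
      subst this
      cases hg : g i <;> simp [aliveQ, h3, hg]
  | node m c l r ihl ihr =>
      intro lo hi i h1 h2 h
      obtain ⟨hh, _, _, hl, hr⟩ := h
      rw [aliveQ]
      by_cases hi' : i < (lo + hi) / 2
      · simp only [if_pos hi']
        exact ihl lo ((lo + hi) / 2) i h1 hi' hl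
      · simp only [if_neg hi']
        exact ihr ((lo + hi) / 2) hi i (by omega) h2 hr

theorem countFrom_models (g : Nat → Option Int) (t : STree) :
    ∀ lo hi ql, models g t lo hi →
      countFrom t lo hi ql = (vals g (max ql lo) hi).length := by
  induction t with
  | leaf v c =>
      intro lo hi ql h
      obtain ⟨hh, _, h3⟩ := h
      subst hh
      rw [countFrom]
      by_cases h1 : ql ≤ lo
      · rw [if_pos h1, show max ql lo = lo by omega]
        unfold vals
        simp only [Nat.add_sub_cancel_left, List.range'_one, List.filterMap_cons,
          List.filterMap_nil]
        cases hg : g lo <;> simp [h3, hg]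
      · rw [if_neg h1, show max ql lo = ql by omega,
            vals_nil_of_ge g ql (lo + 1) (by omega)]
        rfl
  | node m c l r ihl ihr =>
      intro lo hi ql h
      have hnode : models g (.node m c l r) lo hi := h
      obtain ⟨hh, _, h3, hl, hr⟩ := h
      rw [countFrom]
      by_cases h1 : ql ≤ lo
      · rw [if_pos h1, show max ql lo = lo by omega, ← tcount_models g (.node m c l r) lo hi hnode]
        rfl
      · rw [if_neg h1]
        by_cases h2 : hi ≤ ql
        · rw [if_pos h2, vals_nil_of_ge g (max ql lo) hi (by omega)]
          rfl
        · rw [if_neg h2, ihl lo ((lo + hi) / 2) ql hl, ihr ((lo + hi) / 2) hi ql hr,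
              show max ql lo = ql by omega]
          by_cases h4 : ql ≤ (lo + hi) / 2
          · rw [show max ql ((lo + hi) / 2) = (lo + hi) / 2 by omega,
                vals_append g ql ((lo + hi) / 2) hi h4 (by omega), List.length_append]
          · rw [show max ql ((lo + hi) / 2) = ql by omega,
                vals_nil_of_ge g ql ((lo + hi) / 2) (by omega)]
            simp

def findSpec (g : Nat → Option Int) (a hi : Nat) (thr : Int) : Option Nat :=
  (List.range' a (hi - a)).find? (fun k => match g k with
    | some v => decide (v ≤ thr)
    | none => false)

theorem findSpec_none_of_ge (g : Nat → Option Int) (a hi : Nat) (thr : Int) (h : hi ≤ a) :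
    findSpec g a hi thr = none := by
  unfold findSpec
  have : hi - a = 0 := by omega
  simp [this]

theorem find?_congr_mem {α : Type} (p q : α → Bool) (l : List α)
    (h : ∀ x ∈ l, p x = q x) : l.find? p = l.find? q := by
  induction l with
  | nil => rfl
  | cons x xs ih =>
      rw [List.find?_cons, List.find?_cons, h x List.mem_cons_self,
          ih (fun y hy => h y (List.mem_cons_of_mem x hy))]

theorem findSpec_none_of_all (g : Nat → Option Int) (a hi : Nat) (thr : Int)
    (h : ∀ k, a ≤ k → k < hi → (match g k with
      | some v => decide (v ≤ thr)
      | none => false) = false) : findSpec g a hi thr = none := by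
  unfold findSpec
  apply List.find?_eq_none.mpr
  intro k hk
  have := List.mem_range'_1.mp hk
  simp only [h k this.1 (by omega), Bool.false_eq_true, not_false_eq_true]

theorem findSpec_split (g : Nat → Option Int) (a mid hi : Nat) (thr : Int)
    (h1 : a ≤ mid) (h2 : mid ≤ hi) :
    findSpec g a hi thr =
      (match findSpec g a mid thr with
        | some j => some j
        | none => findSpec g mid hi thr) := by
  unfold findSpec
  rw [range'_split a mid hi h1 h2, List.find?_append]
  cases List.find? _ (List.range' a (mid - a)) <;> simp

theorem findFrom_models (g : Nat → Option Int) (t : STree) :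
    ∀ lo hi ql thr, models g t lo hi →
      findFrom t lo hi ql thr = findSpec g (max ql lo) hi thr := by
  induction t with
  | leaf v c =>
      intro lo hi ql thr h
      obtain ⟨hh, h2, _⟩ := h
      subst hh
      simp only [findFrom]
      by_cases h1 : lo + 1 ≤ ql
      · rw [if_pos h1, findSpec_none_of_ge g _ _ thr (by omega)]
      · rw [if_neg h1]
        have hmax : max ql lo = lo := by omega
        unfold findSpec
        rw [hmax]
        simp only [Nat.add_sub_cancel_left, List.range'_one, List.find?_cons, List.find?_nil]
        rw [← h2]
        cases v with
        | none => simp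
        | some x =>
            by_cases hx : thr < x
            · simp [hx, show ¬ x ≤ thr by omega]
            · simp [hx, show x ≤ thr by omega]
  | node m c l r ihl ihr =>
      intro lo hi ql thr h
      obtain ⟨hh, h2, h3, hl, hr⟩ := h
      have hmid1 : lo < (lo + hi) / 2 := by omega
      have hmid2 : (lo + hi) / 2 < hi := by omega
      have hmv : m = specMin (vals g lo hi) := by
        rw [h2, tmin_models g l lo ((lo + hi) / 2) hl, tmin_models g r ((lo + hi) / 2) hi hr,
            vals_append g lo ((lo + hi) / 2) hi (by omega) (by omega), specMin_append]
      simp only [findFrom]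
      by_cases h1 : hi ≤ ql
      · rw [if_pos h1, findSpec_none_of_ge g _ _ thr (by omega)]
      · rw [if_neg h1]
        cases hm : m with
        | none =>
            have hnil := specMin_eq_none _ (hmv.symm.trans hm)
            show (none : Option Nat) = findSpec g (max ql lo) hi thr
            rw [findSpec_none_of_all]
            intro k hk1 hk2
            cases hg : g k with
            | none => rfl
            | some v =>
                exfalso
                have := mem_vals g lo hi k v (by omega) hk2 hg
                rw [hnil] at this
                simp at this
        | some x =>
            show (if thr < x then none
              else match findFrom l lo ((lo + hi) / 2) ql thr with
                | some j => some j
                | none => findFrom r ((lo + hi) / 2) hi ql thr) = findSpec g (max ql lo) hi thr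
            by_cases hx : thr < x
            · rw [if_pos hx, findSpec_none_of_all]
              intro k hk1 hk2
              cases hg : g k with
              | none => rfl
              | some v =>
                  have := specMin_le _ x v (hmv.symm.trans hm)
                    (mem_vals g lo hi k v (by omega) hk2 hg)
                  simp [show ¬ v ≤ thr by omega]
            · rw [if_neg hx, ihl lo ((lo + hi) / 2) ql thr hl, ihr ((lo + hi) / 2) hi ql thr hr]
              by_cases h4 : ql ≤ (lo + hi) / 2
              · rw [show max ql ((lo + hi) / 2) = (lo + hi) / 2 by omega,
                    findSpec_split g (max ql lo) ((lo + hi) / 2) hi thr (by omega) (by omega)]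
              · rw [show max ql ((lo + hi) / 2) = ql by omega,
                    show max ql lo = ql by omega,
                    findSpec_none_of_ge g ql ((lo + hi) / 2) thr (by omega)]

-- A's partner scan characterised as a first-match search
theorem pairStep_eq (f : List Int) (C fi : Int) (u : List Bool) (j n : Nat) :
    pairStep f C fi u j n =
      (match (List.range' j (n - j)).find?
          (fun k => !u.getD k false && decide (fi + f.getD k 0 ≤ C)) with
        | some j' => u.set j' true
        | none => u) := by
  fun_induction pairStep f C fi u j n with
  | case1 j h hu ih =>
      rw [show n - j = (n - (j + 1)) + 1 by omega, List.range'_succ, List.find?_cons]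
      have hp : (!u.getD j false && decide (fi + f.getD j 0 ≤ C)) = false := by
        rw [hu]; rfl
      simp only [hp]
      exact ih
  | case2 j h hu hc =>
      rw [show n - j = (n - (j + 1)) + 1 by omega, List.range'_succ, List.find?_cons]
      simp only [Bool.not_eq_true] at hu
      have hp : (!u.getD j false && decide (fi + f.getD j 0 ≤ C)) = true := by
        rw [hu, decide_eq_true hc]; rfl
      simp only [hp]
  | case3 j h hu hc ih =>
      rw [show n - j = (n - (j + 1)) + 1 by omega, List.range'_succ, List.find?_cons]
      simp only [Bool.not_eq_true] at hu
      have hp : (!u.getD j false && decide (fi + f.getD j 0 ≤ C)) = false := by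
        rw [hu, decide_eq_false hc]; rfl
      simp only [hp]
      exact ih
  | case4 j h =>
      rw [show n - j = 0 by omega]
      simp

-- A's remainder-count loop as a filter length
def listUnused (used : List Bool) (j n : Nat) : List Nat :=
  (List.range' j (n - j)).filter (fun k => !(used.getD k false))

theorem countUnused_eq (u : List Bool) (j n : Nat) (tmp : Int) :
    countUnused u j n tmp = tmp + ((listUnused u j n).length : Int) := by
  fun_induction countUnused u j n tmp with
  | case1 j tmp h ih =>
      have hr : listUnused u j n =
          if u.getD j false then listUnused u (j+1) n else j :: listUnused u (j+1) n := by
        unfold listUnused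
        rw [show n - j = (n - (j + 1)) + 1 by omega, List.range'_succ, List.filter_cons]
        by_cases hu : u.getD j false = true <;>
          (rw [List.getD_eq_getElem?_getD] at hu; simp [hu])
      rw [hr]
      by_cases hu : u.getD j false = true
      · rw [dif_pos hu] at ih
        rw [if_pos hu, if_pos hu]
        exact ih
      · rw [dif_neg hu] at ih
        rw [if_neg hu, if_neg hu, ih, List.length_cons]
        push_cast; ring
  | case2 j tmp h =>
      unfold listUnused
      rw [show n - j = 0 by omega]
      simp

theorem vals_gOf_length (f : List Int) (u : List Bool) (a n : Nat) :
    ((vals (gOf f u) a n).length : Int) = ((listUnused u a n).length : Int) := by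
  unfold vals listUnused
  congr 1
  induction List.range' a (n - a) with
  | nil => rfl
  | cons k ks ih =>
      rw [List.filterMap_cons, List.filter_cons]
      by_cases hu : u.getD k false = true
      · rw [show gOf f u k = none by unfold gOf; rw [if_pos hu],
            show (!u.getD k false) = false by rw [hu]; rfl,
            if_neg Bool.false_ne_true]
        exact ih
      · have hu' : u.getD k false = false := by
          cases hx : u.getD k false
          · rfl
          · exact absurd hx hu
        rw [show gOf f u k = some (f.getD k 0) by unfold gOf; rw [if_neg hu],
            show (!u.getD k false) = true by rw [hu']; rfl,
            if_pos rfl, List.length_cons, List.length_cons, ih]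

theorem gOf_set (f : List Int) (u : List Bool) (i : Nat) (h : i < u.length) :
    (fun k => if k = i then none else gOf f u k) = gOf f (u.set i true) := by
  funext k
  by_cases hk : k = i
  · subst hk
    rw [if_pos rfl]
    unfold gOf
    rw [getD_set_self u k h]
    rfl
  · rw [if_neg hk]
    unfold gOf
    rw [getD_set_ne u i k true hk]

theorem main_loop (f : List Int) (C : Int) (n : Nat) :
    ∀ m i u root, n - i ≤ m → u.length = n → i ≤ n →
      (∀ k, k < i → u.getD k false = true) →
      models (gOf f u) root 0 n →
      solveLoopA f C n i u (i : Int) = solveLoopBseg f C n i root := by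
  intro m
  induction m with
  | zero =>
      intro i u root hm hl hi hused hmod
      have hin : i = n := by omega
      rw [solveLoopA, dif_neg (by omega), solveLoopBseg, dif_neg (by omega), hin]
  | succ m ih =>
      intro i u root hm hl hi hused hmod
      by_cases h : i < n
      · rw [solveLoopA, dif_pos h, solveLoopBseg, dif_pos h]
        have halive : aliveQ root 0 n i = (gOf f u i).isSome :=
          aliveQ_models (gOf f u) root 0 n i (by omega) h hmod
        by_cases hu : u.getD i false = true
        · -- A hits a used index; B sees a dead leaf and both return the remainder formula
          have : aliveQ root 0 n i = false := by
            rw [halive]; unfold gOf; rw [if_pos hu]; rfl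
          rw [if_pos hu, this]
          simp only [Bool.not_false, if_pos rfl]
          rw [countUnused_eq u (i+1) n 0,
              countFrom_models (gOf f u) root 0 n (i+1) hmod,
              show max (i+1) 0 = i + 1 by omega, vals_gOf_length f u (i+1) n]
          norm_num
        · -- A pairs index i; B deletes i and queries the tree for the partner
          simp only [Bool.not_eq_true] at hu
          have hnt : ¬ u.getD i false = true := by rw [hu]; exact Bool.false_ne_true
          have : aliveQ root 0 n i = true := by
            rw [halive]; unfold gOf; rw [if_neg hnt]; rfl
          rw [if_neg hnt, this]
          simp only [Bool.not_true, Bool.false_eq_true, if_false]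
          have hiu : i < u.length := by omega
          have hmod1 : models (gOf f (u.set i true)) (sdelete root 0 n i) 0 n := by
            rw [← gOf_set f u i hiu]
            exact sdelete_models (gOf f u) root 0 n i (by omega) h hmod
          have hfind : findFrom (sdelete root 0 n i) 0 n (i+1) (C - f.getD i 0) =
              (List.range' (i+1) (n - (i+1))).find?
                (fun k => !u.getD k false && decide (f.getD i 0 + f.getD k 0 ≤ C)) := by
            rw [findFrom_models (gOf f (u.set i true)) (sdelete root 0 n i) 0 n (i+1)
                  (C - f.getD i 0) hmod1, show max (i+1) 0 = i + 1 by omega]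
            unfold findSpec
            apply find?_congr_mem
            intro k hk
            have hk' := List.mem_range'_1.mp hk
            have hki : k ≠ i := by omega
            unfold gOf
            rw [getD_set_ne u i k true hki]
            cases huk : u.getD k false <;> simp [huk] <;> omega
          rw [hfind, pairStep_eq f C (f.getD i 0) u (i+1) n]
          have hcast : (i : Int) + 1 = ((i + 1 : Nat) : Int) := by push_cast; ring
          cases hres : (List.range' (i+1) (n - (i+1))).find?
              (fun k => !u.getD k false && decide (f.getD i 0 + f.getD k 0 ≤ C)) with
          | none =>
              rw [hcast]
              exact ih (i+1) (u.set i true) (sdelete root 0 n i) (by omega)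
                (by simp [hl]) (by omega)
                (fun k hk => by
                  by_cases hki : k = i
                  · subst hki; exact getD_set_self u k hiu
                  · rw [getD_set_ne u i k true hki]; exact hused k (by omega))
                hmod1
          | some j =>
              have hjmem := List.find?_some hres
              have hjr := List.mem_range'_1.mp (List.mem_of_find?_eq_some hres)
              have hji : j ≠ i := by omega
              have hju : j < u.length := by omega
              have hcomm : (u.set j true).set i true = (u.set i true).set j true :=
                List.set_comm true true hji
              have hmod2 : models (gOf f ((u.set i true).set j true))
                  (sdelete (sdelete root 0 n i) 0 n j) 0 n := by
                rw [← gOf_set f (u.set i true) j (by simp [hju])]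
                exact sdelete_models (gOf f (u.set i true)) (sdelete root 0 n i) 0 n j
                  (by omega) (by omega) hmod1
              rw [hcast, hcomm]
              exact ih (i+1) ((u.set i true).set j true) (sdelete (sdelete root 0 n i) 0 n j)
                (by omega) (by simp [hl]) (by omega)
                (fun k hk => by
                  by_cases hkj : k = j
                  · omega
                  · rw [getD_set_ne _ j k true hkj]
                    by_cases hki : k = i
                    · subst hki; exact getD_set_self u k hiu
                    · rw [getD_set_ne u i k true hki]; exact hused k (by omega))
                hmod2
      · have hin : i = n := by omega
        rw [solveLoopA, dif_neg (by omega), solveLoopBseg, dif_neg (by omega), hin]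

theorem gOf_replicate (f : List Int) (n : Nat) :
    gOf f (List.replicate n false) = fun k => some (f.getD k 0) := by
  funext k
  unfold gOf
  have : (List.replicate n false).getD k false = false := by
    rw [List.getD_eq_getElem?_getD, List.getElem?_replicate]
    split <;> rfl
  rw [this]
  simp

-- ===== VERDICT (by name: the statement is the Claim_ definition above) =====
theorem solve_spec : Claim_equal_solve := by
  intro f C _
  unfold Spec_solve solve solve_alt
  by_cases h0 : f.length = 0
  · rw [if_pos h0, h0]
    rw [solveLoopA, dif_neg (by omega)]
    rfl
  · rw [if_neg h0]
    have hmod : models (gOf f (List.replicate f.length false)) (build f 0 f.length) 0 f.length := by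
      rw [gOf_replicate]
      exact build_models f f.length 0 f.length (by omega) (by omega)
    have := main_loop f C f.length f.length 0 (List.replicate f.length false)
      (build f 0 f.length) (by omega) (by simp) (by omega) (by intro k hk; omega) hmod
    simpa using this
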